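-- pv_equiv track=rewrite | github.com/atfinke/WikiRaces | WKRPython/ArticleCompiler.py | remove_articles_with_year
-- ===== SOURCE A (Python) =====
-- def remove_articles_with_year(articles):
--     years = [str(i) for i in range(1000, 2100)]
--     clean_articles = []
--     for article in articles:
--         is_clean = True
--         for year in years:
--             if year in article:
--                 is_clean = False
--                 break
--
--         if is_clean:
--             clean_articles.append(article)
--     return clean_articles
-- ===== SOURCE B (Python) =====
-- def remove_articles_with_year(articles):
--     def dirty(s):
--         for i in range(len(s) - 3):
--             c0, c1, c2, c3 = s[i], s[i+1], s[i+2], s[i+3]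
--             digs = ('0' <= c2 <= '9') and ('0' <= c3 <= '9')
--             if digs and ((c0 == '1' and '0' <= c1 <= '9') or (c0 == '2' and c1 == '0')):
--                 return True
--         return False
--     return [a for a in articles if not dirty(a)]
-- ===== Notes on version B (the rewrite author's own statement) =====
-- stated objective: faster
-- what changed: A builds a list of 1100 year strings and runs a substring search for each of them over every article; B makes a single sliding-window pass per article, testing each 4-character window directly for being a year 1000-2099.
import Mathlib
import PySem

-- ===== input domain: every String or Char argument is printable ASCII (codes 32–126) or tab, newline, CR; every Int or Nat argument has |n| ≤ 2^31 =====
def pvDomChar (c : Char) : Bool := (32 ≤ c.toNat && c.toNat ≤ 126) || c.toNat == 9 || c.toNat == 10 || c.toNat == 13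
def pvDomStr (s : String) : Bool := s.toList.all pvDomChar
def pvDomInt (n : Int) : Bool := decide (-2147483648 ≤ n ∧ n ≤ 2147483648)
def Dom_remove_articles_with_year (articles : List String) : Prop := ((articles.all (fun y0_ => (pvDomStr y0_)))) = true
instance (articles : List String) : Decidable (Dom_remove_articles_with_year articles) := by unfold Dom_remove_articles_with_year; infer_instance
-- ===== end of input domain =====

-- B replaces A's 1100 substring searches per article by one sliding 4-char window pass per article; same return value.

-- ===== PORT A =====
def remove_articles_with_year (articles : List String) : List String :=
  let years := (PySem.List.pyRange 1000 2100 1).map PySem.Int.toStr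
  articles.foldl (fun clean_articles article =>
    let is_clean := years.foldl (fun ok year => if PySem.Str.isIn year article then false else ok) true
    if is_clean then clean_articles ++ [article] else clean_articles) []

-- ===== PORT B =====
-- '0' <= c <= '9'
def pvIsDig (c : Char) : Bool := '0' ≤ c && c ≤ '9'

-- the 4-char window starts a year 1000-2099
def pvWindowHit (c0 c1 c2 c3 : Char) : Bool :=
  (pvIsDig c2 && pvIsDig c3) && ((c0 == '1' && pvIsDig c1) || (c0 == '2' && c1 == '0'))

-- Source B's sliding window: test the 4-char window at each position in turn
def pvDirty : List Char → Bool
  | [] => false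
  | c0 :: rest =>
      (match rest with
       | c1 :: c2 :: c3 :: _ => pvWindowHit c0 c1 c2 c3
       | _ => false) || pvDirty rest

def remove_articles_with_year_alt (articles : List String) : List String :=
  articles.filter (fun a => !pvDirty a.toList)

-- ===== PRECONDITION & SPEC =====
def Spec_remove_articles_with_year (articles : List String) (out : List String) : Prop := out = remove_articles_with_year_alt articles
instance (articles : List String) (out : List String) : Decidable (Spec_remove_articles_with_year articles out) := by unfold Spec_remove_articles_with_year; infer_instance

-- ===== CLAIM (what is proved, stated in full; the proofs are below) =====
def Claim_equal_remove_articles_with_year : Prop := ∀ (articles : List String), Dom_remove_articles_with_year articles → Spec_remove_articles_with_year articles (remove_articles_with_year articles)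

-- ===== LEMMAS AND PROOFS =====

-- digit-char facts
theorem pvIsDig_ofNat (k : Nat) (h : k < 10) : pvIsDig (Char.ofNat (48 + k)) = true := by
  interval_cases k <;> decide

theorem pvIsDig_elim (c : Char) (h : pvIsDig c = true) :
    ∃ k, k < 10 ∧ c = Char.ofNat (48 + k) := by
  simp only [pvIsDig, Bool.and_eq_true, decide_eq_true_eq, Char.le_def, UInt32.le_iff_toNat_le] at h
  have h48 : 48 ≤ c.toNat := h.1
  have h57 : c.toNat ≤ 57 := h.2
  refine ⟨c.toNat - 48, by omega, ?_⟩
  have he : 48 + (c.toNat - 48) = c.toNat := by omega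
  rw [he]; exact (Char.ofNat_toNat c).symm

theorem pvHit_1 (k1 k2 k3 : Nat) (h1 : k1 < 10) (h2 : k2 < 10) (h3 : k3 < 10) :
    pvWindowHit '1' (Char.ofNat (48 + k1)) (Char.ofNat (48 + k2)) (Char.ofNat (48 + k3)) = true := by
  simp [pvWindowHit, pvIsDig_ofNat _ h1, pvIsDig_ofNat _ h2, pvIsDig_ofNat _ h3]

theorem pvHit_2 (k2 k3 : Nat) (h2 : k2 < 10) (h3 : k3 < 10) :
    pvWindowHit '2' '0' (Char.ofNat (48 + k2)) (Char.ofNat (48 + k3)) = true := by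
  simp [pvWindowHit, pvIsDig_ofNat _ h2, pvIsDig_ofNat _ h3]

-- str(n) for the two decades of years, decided once over all digit combinations
theorem pvToChars_1xxx : ∀ k1 ∈ List.range 10, ∀ k2 ∈ List.range 10, ∀ k3 ∈ List.range 10,
    PySem.Int.toChars ((1000 + (k1 * 100 + k2 * 10 + k3) : Nat) : Int)
      = ['1', Char.ofNat (48 + k1), Char.ofNat (48 + k2), Char.ofNat (48 + k3)] := by decide

theorem pvToChars_20xx : ∀ k2 ∈ List.range 10, ∀ k3 ∈ List.range 10,
    PySem.Int.toChars ((2000 + (k2 * 10 + k3) : Nat) : Int)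
      = ['2', '0', Char.ofNat (48 + k2), Char.ofNat (48 + k3)] := by decide

-- no 4-char window fits in a list shorter than 4
theorem pvNo4 (l : List Char) (h : l.length < 4) :
    ¬ ∃ c0 c1 c2 c3, pvWindowHit c0 c1 c2 c3 = true ∧ [c0, c1, c2, c3] <:+: l := by
  rintro ⟨a, b, c, d, -, hinf⟩
  have := hinf.length_le
  simp at this
  omega

-- unfolding pvDirty at a length-4 window
theorem pvDirty_four (a b c d : Char) (t : List Char) :
    pvDirty (a :: b :: c :: d :: t) = (pvWindowHit a b c d || pvDirty (b :: c :: d :: t)) := rfl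

-- pvDirty finds exactly the 4-char infix windows that hit
theorem pvDirty_iff (cs : List Char) :
    pvDirty cs = true ↔ ∃ c0 c1 c2 c3, pvWindowHit c0 c1 c2 c3 = true ∧ [c0, c1, c2, c3] <:+: cs := by
  induction cs with
  | nil => exact iff_of_false (by rw [show pvDirty [] = false from rfl]; simp) (pvNo4 [] (by simp))
  | cons c0 rest ih =>
      rcases rest with _ | ⟨c1, _ | ⟨c2, _ | ⟨c3, t⟩⟩⟩
      · exact iff_of_false (by rw [show pvDirty [c0] = false from rfl]; simp) (pvNo4 [c0] (by simp))
      · exact iff_of_false (by rw [show pvDirty [c0, c1] = false from rfl]; simp) (pvNo4 [c0, c1] (by simp))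
      · exact iff_of_false (by rw [show pvDirty [c0, c1, c2] = false from rfl]; simp) (pvNo4 [c0, c1, c2] (by simp))
      · rw [pvDirty_four]
        simp only [Bool.or_eq_true, ih]
        constructor
        · rintro (hw | ⟨d0, d1, d2, d3, hh, hinf⟩)
          · exact ⟨c0, c1, c2, c3, hw, ⟨[], t, by simp⟩⟩
          · exact ⟨d0, d1, d2, d3, hh, hinf.trans (List.suffix_cons c0 _).isInfix⟩
        · rintro ⟨d0, d1, d2, d3, hh, hinf⟩
          rcases List.infix_cons_iff.mp hinf with hpre | hinf'
          · obtain ⟨tp, ht⟩ := hpre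
            simp only [List.cons_append, List.cons.injEq, List.nil_append] at ht
            obtain ⟨h0, h1, h2, h3, -⟩ := ht
            subst h0 h1 h2 h3
            exact Or.inl hh
          · exact Or.inr ⟨d0, d1, d2, d3, hh, hinf'⟩

-- a hit window IS str(n) for some year n in range(1000, 2100)
theorem pvHit_to_year (c0 c1 c2 c3 : Char) (h : pvWindowHit c0 c1 c2 c3 = true) :
    ∃ n : Int, 1000 ≤ n ∧ n < 2100 ∧ PySem.Int.toChars n = [c0, c1, c2, c3] := by
  simp only [pvWindowHit, Bool.and_eq_true, Bool.or_eq_true, beq_iff_eq] at h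
  obtain ⟨⟨hd2, hd3⟩, hcase⟩ := h
  obtain ⟨k2, hk2, rfl⟩ := pvIsDig_elim _ hd2
  obtain ⟨k3, hk3, rfl⟩ := pvIsDig_elim _ hd3
  rcases hcase with ⟨rfl, hd1⟩ | ⟨rfl, rfl⟩
  · obtain ⟨k1, hk1, rfl⟩ := pvIsDig_elim _ hd1
    refine ⟨((1000 + (k1 * 100 + k2 * 10 + k3) : Nat) : Int), by push_cast; omega, by push_cast; omega, ?_⟩
    exact pvToChars_1xxx k1 (List.mem_range.mpr hk1) k2 (List.mem_range.mpr hk2) k3 (List.mem_range.mpr hk3)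
  · refine ⟨((2000 + (k2 * 10 + k3) : Nat) : Int), by push_cast; omega, by push_cast; omega, ?_⟩
    exact pvToChars_20xx k2 (List.mem_range.mpr hk2) k3 (List.mem_range.mpr hk3)

-- str(n) for a year n in range is a hit window
theorem pvYear_to_hit (n : Int) (h1 : 1000 ≤ n) (h2 : n < 2100) :
    ∃ c0 c1 c2 c3, pvWindowHit c0 c1 c2 c3 = true ∧ PySem.Int.toChars n = [c0, c1, c2, c3] := by
  set k1 := n.toNat / 100 % 10 with hk1
  set k2 := n.toNat / 10 % 10 with hk2
  set k3 := n.toNat % 10 with hk3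
  by_cases hcase : n < 2000
  · have hdec : n = ((1000 + (k1 * 100 + k2 * 10 + k3) : Nat) : Int) := by omega
    refine ⟨'1', Char.ofNat (48 + k1), Char.ofNat (48 + k2), Char.ofNat (48 + k3),
      pvHit_1 _ _ _ (by omega) (by omega) (by omega), ?_⟩
    rw [hdec]
    exact pvToChars_1xxx k1 (List.mem_range.mpr (by omega)) k2 (List.mem_range.mpr (by omega))
      k3 (List.mem_range.mpr (by omega))
  · have hz : k1 = 0 := by omega
    have hdec : n = ((2000 + (k2 * 10 + k3) : Nat) : Int) := by omega
    refine ⟨'2', '0', Char.ofNat (48 + k2), Char.ofNat (48 + k3),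
      pvHit_2 _ _ (by omega) (by omega), ?_⟩
    rw [hdec]
    exact pvToChars_20xx k2 (List.mem_range.mpr (by omega)) k3 (List.mem_range.mpr (by omega))

-- per article: "some year string occurs in a" = pvDirty
theorem pvAny_eq_dirty (a : String) :
    ((PySem.List.pyRange 1000 2100 1).map PySem.Int.toStr).any (fun y => PySem.Str.isIn y a) = pvDirty a.toList := by
  rcases hB : pvDirty a.toList with _ | _
  · rw [List.any_eq_false]
    intro y hy
    simp only [List.mem_map] at hy
    obtain ⟨n, hn, rfl⟩ := hy
    have hr := (PySem.List.mem_pyRange_one).mp hn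
    intro hin
    have hinf := (PySem.Str.isIn_iff_infix _ _).mp hin
    rw [PySem.Int.toList_toStr] at hinf
    obtain ⟨c0, c1, c2, c3, hhit, heq⟩ := pvYear_to_hit n (by omega) (by omega)
    rw [heq] at hinf
    have := (pvDirty_iff a.toList).mpr ⟨c0, c1, c2, c3, hhit, hinf⟩
    simp [this] at hB
  · obtain ⟨c0, c1, c2, c3, hhit, hinf⟩ := (pvDirty_iff a.toList).mp hB
    obtain ⟨n, hn1, hn2, hch⟩ := pvHit_to_year c0 c1 c2 c3 hhit
    rw [List.any_eq_true]
    refine ⟨PySem.Int.toStr n, List.mem_map.mpr ⟨n, (PySem.List.mem_pyRange_one).mpr ⟨hn1, hn2⟩, rfl⟩, ?_⟩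
    rw [PySem.Str.isIn_iff_infix, PySem.Int.toList_toStr, hch]
    exact hinf

-- ===== VERDICT (by name: the statement is the Claim_ definition above) =====
theorem remove_articles_with_year_spec : Claim_equal_remove_articles_with_year := by
  intro articles _
  show remove_articles_with_year articles = remove_articles_with_year_alt articles
  show articles.foldl (fun clean_articles article =>
      if ((PySem.List.pyRange 1000 2100 1).map PySem.Int.toStr).foldl
          (fun ok year => if PySem.Str.isIn year article then false else ok) true
        then clean_articles ++ [article] else clean_articles) []
    = remove_articles_with_year_alt articles
  have hcongr := PySem.List.foldl_congr_mem (l := articles) (init := ([] : List String))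
    (f := fun clean_articles article =>
      if ((PySem.List.pyRange 1000 2100 1).map PySem.Int.toStr).foldl
          (fun ok year => if PySem.Str.isIn year article then false else ok) true
        then clean_articles ++ [article] else clean_articles)
    (g := fun acc a => if !pvDirty a.toList then acc ++ [a] else acc)
    (by intro acc a _
        simp only [PySem.List.foldl_if_false_eq, Bool.true_and, pvAny_eq_dirty])
  rw [hcongr, PySem.List.foldl_append_if_eq_filter]
  simp [remove_articles_with_year_alt]
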